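-- pv_equiv track=rewrite | github.com/masoncole91/school-code | Algorithms/amount helper/Amount.py | amount
-- ===== SOURCE A (Python) =====
-- def amount(A, S):
--     """from input array, return list:
--     -of unique combos summing target value;
--     -else, empty;
--     don't repeat combos or pass a value's input frequency;
--     time complexity O(len(A)^S)"""
--     result = []
--
--     # track frequencies to avoid repeats
--     count = {num:0 for num in A}
--     for num in A:
--         count[num] += 1
--
--     # remove repeats, as count dict tracks instances;
--     A = sorted(set(A))
--
--     amount_helper(A, 0, result, S, [], count)
--     return result
--
-- def amount_helper(nums, start, result, remains, combo, count):
--     """amount() helper function;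
--     recurse and find unique combos without passing a value's frequency;
--     code repurposed from:
--     Exploration 5.2: Backtracking - Combination Sum Problem"""
--
--     # if sum reached, log combo
--     if remains == 0:
--         result.append(combo[:])
--         return
--     elif remains < 0:
--         return
--
--     for indice in range(start, len(nums)):
--
--         # add and recurse, checking validity
--         if count[nums[indice]] > 0 and nums[indice] <= remains:
--             combo.append(nums[indice])
--             count[nums[indice]] -= 1
--             amount_helper(nums, indice, result, remains - nums[indice], combo, count)
--
--             # let new combos use the value
--             count[nums[indice]] += 1
--
--             # try next value
--             combo.pop()
-- ===== SOURCE B (Python) =====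
-- def amount(A, S):
--     """Same combos in the same order as the original, but the recursion
--     advances one distinct value per frame, choosing how many copies k of
--     that value to take (from the largest feasible count down to zero)."""
--     count = {}
--     for num in A:
--         count[num] = count.get(num, 0) + 1
--     vals = sorted(count)
--     result = []
--     take(vals, count, 0, S, [], result)
--     return result
--
-- def take(vals, count, i, r, combo, result):
--     """amount() helper: at distinct value vals[i] with remaining sum r,
--     try k copies for k = kmax, kmax-1, ..., 1, then none."""
--     if r == 0:
--         result.append(combo)
--         return
--     if r < 0 or i == len(vals):
--         return
--     v = vals[i]
--     f = count[v]
--     kmax = min(f, r // v) if v > 0 else f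
--     for k in range(kmax, 0, -1):
--         take(vals, count, i + 1, r - k * v, combo + [v] * k, result)
--     take(vals, count, i + 1, r, combo, result)
-- ===== Notes on version B (the rewrite author's own statement) =====
-- stated objective: alternative
-- what changed: The backtracking recursion over picked elements (re-entering the same index while frequencies last) is replaced by a recursion over distinct-value indices that chooses the number of copies k of each value in one frame, looping k from the largest feasible count down to zero, which reproduces A's exact result order.
import Mathlib
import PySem

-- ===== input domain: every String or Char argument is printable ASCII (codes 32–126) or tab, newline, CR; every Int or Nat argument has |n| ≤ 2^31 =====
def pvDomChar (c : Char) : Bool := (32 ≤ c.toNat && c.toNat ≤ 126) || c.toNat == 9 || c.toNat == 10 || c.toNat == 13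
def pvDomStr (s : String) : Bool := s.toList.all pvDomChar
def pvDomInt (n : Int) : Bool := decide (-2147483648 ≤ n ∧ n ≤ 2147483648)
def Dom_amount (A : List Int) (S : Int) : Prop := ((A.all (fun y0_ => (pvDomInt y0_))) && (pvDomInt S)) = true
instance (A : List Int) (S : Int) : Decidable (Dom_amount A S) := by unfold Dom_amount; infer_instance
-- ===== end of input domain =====

-- B replaces A's element-picking backtracking (re-entering the same index while the
-- frequency lasts) by a recursion over distinct-value indices choosing the copy count
-- per value, looping it from the largest feasible count down to zero: an alternative
-- decomposition producing the identical result list in the identical order.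


-- ===== PORT A =====
-- Python's count dict is decremented before the recursive call and restored right
-- after it, so every loop iteration starts from the same dict: the pure port passes
-- the decremented copy into the recursion only.  fuel = len(A) + 1 bounds the
-- recursion depth (each level removes one available element); the fuel-0 branch is
-- never reached.  nums[indice] is an in-range lookup (start ≤ indice < len(nums)),
-- and count[nums[indice]] is a present key, so pyGetD/getD are exact here.
def amountHelper (fuel : Nat) (nums : List Int) (start : Int) (remains : Int)
    (combo : List Int) (count : PySem.Dict Int Int) : List (List Int) :=
  match fuel with
  | 0 => []
  | fuel + 1 =>
    if remains = 0 then [combo]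
    else if remains < 0 then []
    else
      (PySem.List.pyRange start (nums.length : Int) 1).foldl (fun result indice =>
        let v := PySem.List.pyGetD nums indice 0
        if 0 < count.getD v 0 ∧ v ≤ remains then
          result ++ amountHelper fuel nums indice (remains - v) (combo ++ [v])
            (count.insert v (count.getD v 0 - 1))
        else result) []

def amount (A : List Int) (S : Int) : List (List Int) :=
  let count0 := A.foldl (fun d num => d.insert num 0) PySem.Dict.empty
  let count := A.foldl (fun d num => d.modify num 0 (· + 1)) count0
  let A' := PySem.List.sorted (PySem.Set.ofList A) (fun x => x) false
  amountHelper (A.length + 1) A' 0 S [] count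

-- ===== PORT B =====
-- fuel = len(vals) + 1 bounds the depth (i grows by 1 each call); the fuel-0 branch
-- is never reached.  vals[i] is in range and v is a key of count, so lookups are
-- exact; every k in range(kmax, 0, -1) is ≥ 1, so k.toNat is exact.
def takeHelper (fuel : Nat) (vals : List Int) (count : PySem.Dict Int Int)
    (i : Int) (r : Int) (combo : List Int) : List (List Int) :=
  match fuel with
  | 0 => []
  | fuel + 1 =>
    if r = 0 then [combo]
    else if r < 0 ∨ i = (vals.length : Int) then []
    else
      let v := PySem.List.pyGetD vals i 0
      let f := count.getD v 0
      let kmax := if 0 < v then min f (PySem.Int.floordiv r v) else f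
      ((PySem.List.pyRange kmax 0 (-1)).foldl (fun result k =>
          result ++ takeHelper fuel vals count (i + 1) (r - k * v)
            (combo ++ List.replicate k.toNat v)) [])
        ++ takeHelper fuel vals count (i + 1) r combo

def amount_alt (A : List Int) (S : Int) : List (List Int) :=
  let count := A.foldl (fun d num => d.insert num (d.getD num 0 + 1)) PySem.Dict.empty
  let vals := PySem.List.sorted count.keys (fun x => x) false
  takeHelper (vals.length + 1) vals count 0 S []

-- ===== PRECONDITION & SPEC =====
def Spec_amount (A : List Int) (S : Int) (out : List (List Int)) : Prop := out = amount_alt A S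
instance (A : List Int) (S : Int) (out : List (List Int)) : Decidable (Spec_amount A S out) := by unfold Spec_amount; infer_instance

-- ===== CLAIM (what is proved, stated in full; the proofs are below) =====
def Claim_equal_amount : Prop := ∀ (A : List Int) (S : Int), Dom_amount A S → Spec_amount A S (amount A S)

-- ===== LEMMAS AND PROOFS =====

lemma foldl_if_append_eq_flatMap {α β : Type} (p : α → Prop) [DecidablePred p]
    (g : α → List β) (l : List α) (init : List β) :
    l.foldl (fun res x => if p x then res ++ g x else res) init
      = init ++ l.flatMap (fun x => if p x then g x else []) := by
  have h : (fun (res : List β) x => if p x then res ++ g x else res)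
      = (fun res x => res ++ (if p x then g x else [])) := by
    funext res x; split <;> simp
  rw [h, PySem.List.foldl_append_eq_flatMap]

lemma HA_pos (fa : Nat) (vals : List Int) (i r : Int) (c : List Int)
    (cnt : PySem.Dict Int Int) (hr : 0 < r) :
    amountHelper (fa + 1) vals i r c cnt =
      (PySem.List.pyRange i (vals.length : Int) 1).flatMap (fun j =>
        if 0 < cnt.getD (PySem.List.pyGetD vals j 0) 0 ∧ PySem.List.pyGetD vals j 0 ≤ r then
          amountHelper fa vals j (r - PySem.List.pyGetD vals j 0)
            (c ++ [PySem.List.pyGetD vals j 0])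
            (cnt.insert (PySem.List.pyGetD vals j 0)
              (cnt.getD (PySem.List.pyGetD vals j 0) 0 - 1))
        else []) := by
  conv_lhs => rw [amountHelper]
  rw [if_neg (by omega), if_neg (by omega)]
  exact foldl_if_append_eq_flatMap _ _ _ []

lemma HA_step (fa : Nat) (vals : List Int) (i r : Int) (c : List Int)
    (cnt : PySem.Dict Int Int) (hr : 0 < r) (hi : i < (vals.length : Int)) :
    amountHelper (fa + 1) vals i r c cnt =
      (if 0 < cnt.getD (PySem.List.pyGetD vals i 0) 0 ∧ PySem.List.pyGetD vals i 0 ≤ r then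
        amountHelper fa vals i (r - PySem.List.pyGetD vals i 0)
          (c ++ [PySem.List.pyGetD vals i 0])
          (cnt.insert (PySem.List.pyGetD vals i 0)
            (cnt.getD (PySem.List.pyGetD vals i 0) 0 - 1))
      else []) ++ amountHelper (fa + 1) vals (i + 1) r c cnt := by
  rw [HA_pos fa vals i r c cnt hr, HA_pos fa vals (i+1) r c cnt hr]
  rw [PySem.List.pyRange_one_cons hi]
  simp [List.flatMap_cons]

lemma getElem_mem_drop {α : Type} (l : List α) (a b : Nat) (hab : a ≤ b) (hb : b < l.length) : l[b] ∈ l.drop a := by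
  have h1 : b - a < (l.drop a).length := by simp; omega
  have h2 : (l.drop a)[b - a] = l[b] := by
    rw [List.getElem_drop]; congr 1; omega
  rw [← h2]; exact List.getElem_mem h1

lemma drop_subset_drop {α : Type} (l : List α) (a b : Nat) (hab : a ≤ b) : l.drop b ⊆ l.drop a := by
  have : l.drop b = (l.drop a).drop (b - a) := by rw [List.drop_drop]; congr 1; omega
  rw [this]; exact List.drop_subset _ _

lemma HA_congr : ∀ (fa : Nat) (vals : List Int) (i r : Int) (c : List Int)
    (cnt cnt' : PySem.Dict Int Int), 0 ≤ i →
    (∀ v ∈ vals.drop i.toNat, cnt.getD v 0 = cnt'.getD v 0) →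
    amountHelper fa vals i r c cnt = amountHelper fa vals i r c cnt' := by
  intro fa
  induction fa with
  | zero => intro vals i r c cnt cnt' _ _; rfl
  | succ fa ih =>
    intro vals i r c cnt cnt' h0 hagree
    by_cases hr0 : r = 0
    · subst hr0; rw [amountHelper, amountHelper]; simp
    by_cases hrn : r < 0
    · rw [amountHelper, amountHelper]; rw [if_neg hr0, if_neg hr0, if_pos hrn, if_pos hrn]
    have hr : 0 < r := by omega
    rw [HA_pos fa vals i r c cnt hr, HA_pos fa vals i r c cnt' hr]
    apply List.flatMap_congr
    intro j hj
    rw [PySem.List.mem_pyRange_one] at hj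
    set v := PySem.List.pyGetD vals j 0 with hv
    have hjn : j.toNat < vals.length := by omega
    have hvval : v = vals[j.toNat] := by
      rw [hv, PySem.List.pyGetD_eq_getElem vals 0 (by omega) (by omega)]
    have hvmem : v ∈ vals.drop i.toNat := by
      rw [hvval]; exact getElem_mem_drop vals i.toNat j.toNat (by omega) hjn
    rw [hagree v hvmem]
    by_cases hc : 0 < cnt'.getD v 0 ∧ v ≤ r
    · rw [if_pos hc, if_pos hc]
      apply ih _ _ _ _ _ _ (by omega)
      intro w hw
      rw [PySem.Dict.getD_insert, PySem.Dict.getD_insert]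
      split
      · rfl
      · exact hagree w (drop_subset_drop vals i.toNat j.toNat (by omega) hw)
    · rw [if_neg hc, if_neg hc]

def cntSum (vals : List Int) (d : PySem.Dict Int Int) : Nat :=
  (vals.map (fun v => (d.getD v 0).toNat)).sum

lemma cntSum_insert_le (vals : List Int) (d : PySem.Dict Int Int) (v : Int) :
    cntSum vals (d.insert v (d.getD v 0 - 1)) ≤ cntSum vals d := by
  induction vals with
  | nil => simp [cntSum]
  | cons w t ih =>
    simp only [cntSum, List.map_cons, List.sum_cons] at *
    have h : ((d.insert v (d.getD v 0 - 1)).getD w 0).toNat ≤ (d.getD w 0).toNat := by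
      rw [PySem.Dict.getD_insert]
      split
      · subst w; omega
      · omega
    omega

lemma cntSum_insert_lt (vals : List Int) (d : PySem.Dict Int Int) (v : Int)
    (hv : v ∈ vals) (h : 0 < d.getD v 0) :
    cntSum vals (d.insert v (d.getD v 0 - 1)) < cntSum vals d := by
  induction vals with
  | nil => simp at hv
  | cons w t ih =>
    simp only [cntSum, List.map_cons, List.sum_cons] at *
    rcases List.mem_cons.mp hv with hw | ht
    · subst hw
      have h1 : ((d.insert v (d.getD v 0 - 1)).getD v 0).toNat < (d.getD v 0).toNat := by
        rw [PySem.Dict.getD_insert_self]; omega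
      have h2 := cntSum_insert_le t d v
      simp only [cntSum] at h2
      omega
    · have h1 : ((d.insert v (d.getD v 0 - 1)).getD w 0).toNat ≤ (d.getD w 0).toNat := by
        rw [PySem.Dict.getD_insert]; split
        · subst w; omega
        · omega
      have h2 := ih ht
      omega

lemma cntSum_ge (vals : List Int) (d : PySem.Dict Int Int) (v : Int) (hv : v ∈ vals) :
    (d.getD v 0).toNat ≤ cntSum vals d := by
  induction vals with
  | nil => simp at hv
  | cons w t ih =>
    simp only [cntSum, List.map_cons, List.sum_cons] at *
    rcases List.mem_cons.mp hv with hw | ht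
    · subst hw; omega
    · have := ih ht; omega

lemma HA_irr : ∀ (fa fb : Nat) (vals : List Int) (i r : Int) (c : List Int)
    (cnt : PySem.Dict Int Int), 0 ≤ i →
    cntSum vals cnt < fa → cntSum vals cnt < fb →
    amountHelper fa vals i r c cnt = amountHelper fb vals i r c cnt := by
  intro fa
  induction fa with
  | zero => intro fb vals i r c cnt _ hfa _; omega
  | succ fa ih =>
    intro fb vals i r c cnt h0 hfa hfb
    match fb, hfb with
    | fb + 1, hfb =>
    by_cases hr0 : r = 0
    · subst hr0; rw [amountHelper, amountHelper]; simp
    by_cases hrn : r < 0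
    · rw [amountHelper, amountHelper]; rw [if_neg hr0, if_neg hr0, if_pos hrn, if_pos hrn]
    have hr : 0 < r := by omega
    rw [HA_pos fa vals i r c cnt hr, HA_pos fb vals i r c cnt hr]
    apply List.flatMap_congr
    intro j hj
    rw [PySem.List.mem_pyRange_one] at hj
    set v := PySem.List.pyGetD vals j 0 with hv
    have hjn : j.toNat < vals.length := by omega
    have hvval : v = vals[j.toNat] := by
      rw [hv, PySem.List.pyGetD_eq_getElem vals 0 (by omega) (by omega)]
    have hvmem : v ∈ vals := by rw [hvval]; exact List.getElem_mem hjn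
    by_cases hc : 0 < cnt.getD v 0 ∧ v ≤ r
    · rw [if_pos hc, if_pos hc]
      have hlt := cntSum_insert_lt vals cnt v hvmem hc.1
      exact ih fb vals j (r - v) (c ++ [v]) _ (by omega) (by omega) (by omega)
    · rw [if_neg hc, if_neg hc]

lemma countdown_shift (a : Int) (ha : 1 ≤ a) :
    PySem.List.pyRange a 0 (-1)
      = ((PySem.List.pyRange (a - 1) 0 (-1)).map (fun k => k + 1)) ++ [(1 : Int)] := by
  rw [PySem.List.pyRange_neg_one, PySem.List.pyRange_neg_one]
  have h1 : (a - 0).toNat = (a - 1 - 0).toNat + 1 := by omega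
  rw [h1, List.range_succ]
  simp only [List.map_append, List.map_map, List.map_cons, List.map_nil]
  congr 1
  · apply List.map_congr_left; intro k hk; simp; omega
  · simp; omega

lemma nodup_getElem_not_mem_drop {α : Type} (l : List α) (a : Nat) (h : l.Nodup)
    (ha : a < l.length) : l[a] ∉ l.drop (a + 1) := by
  intro hmem
  obtain ⟨k, hk, hkeq⟩ := List.getElem_of_mem hmem
  rw [List.getElem_drop] at hkeq
  have hlen : a + 1 + k < l.length := by
    have := hk; simp at this; omega
  have := (List.Nodup.getElem_inj_iff h).mp hkeq.symm
  omega

lemma floordiv_sub_self (r v : Int) (hv : 0 < v) :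
    PySem.Int.floordiv (r - v) v = PySem.Int.floordiv r v - 1 := by
  rw [PySem.Int.floordiv_eq_ediv_of_pos hv, PySem.Int.floordiv_eq_ediv_of_pos hv]
  have := Int.add_mul_ediv_right r (-1) (by omega : v ≠ 0)
  have heq : r + -1 * v = r - v := by ring
  rw [heq] at this
  omega

lemma floordiv_nonneg' (r v : Int) (hr : 0 ≤ r) (hv : 0 < v) :
    0 ≤ PySem.Int.floordiv r v := by
  rw [PySem.Int.floordiv_eq_ediv_of_pos hv]
  exact Int.ediv_nonneg hr (by omega)

lemma floordiv_zero_of_lt (r v : Int) (hr : 0 ≤ r) (hv : r < v) :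
    PySem.Int.floordiv r v = 0 := by
  rw [PySem.Int.floordiv_eq_ediv_of_pos (by omega)]
  exact Int.ediv_eq_zero_of_lt hr hv

lemma floordiv_self' (v : Int) (hv : 0 < v) : PySem.Int.floordiv v v = 1 := by
  rw [PySem.Int.floordiv_eq_ediv_of_pos hv]
  exact Int.ediv_self (by omega)

lemma HA_zero (fa : Nat) (vals : List Int) (i : Int) (c : List Int)
    (cnt : PySem.Dict Int Int) : amountHelper (fa + 1) vals i 0 c cnt = [c] := by
  rw [amountHelper]; simp

lemma HA_unroll : ∀ (mhat : Nat) (vals : List Int) (i r : Int) (c : List Int)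
    (cnt : PySem.Dict Int Int) (fa fb : Nat), vals.Nodup → 0 ≤ i →
    i < (vals.length : Int) → 0 < r →
    cnt.getD (PySem.List.pyGetD vals i 0) 0 = (mhat : Int) →
    cntSum vals cnt < fa → cntSum vals cnt < fb →
    amountHelper fa vals i r c cnt =
      (PySem.List.pyRange
          (if 0 < PySem.List.pyGetD vals i 0 then
            min ((mhat : Int)) (PySem.Int.floordiv r (PySem.List.pyGetD vals i 0))
          else (mhat : Int)) 0 (-1)).flatMap (fun k =>
        amountHelper fb vals (i + 1) (r - k * PySem.List.pyGetD vals i 0)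
          (c ++ List.replicate k.toNat (PySem.List.pyGetD vals i 0)) cnt)
      ++ amountHelper fb vals (i + 1) r c cnt := by
  intro mhat
  induction mhat with
  | zero =>
    intro vals i r c cnt fa fb hnd h0 hi hr hm hfa hfb
    match fa, hfa with
    | fa + 1, hfa =>
    set v := PySem.List.pyGetD vals i 0 with hv
    have hkmax : (if 0 < v then min ((0:Nat) : Int) (PySem.Int.floordiv r v) else ((0:Nat):Int)) = 0 := by
      split
      · have := floordiv_nonneg' r v (by omega) (by assumption); omega
      · simp
    rw [hkmax, PySem.List.pyRange_neg_one_eq_nil (by omega), List.flatMap_nil, List.nil_append]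
    rw [HA_step fa vals i r c cnt hr hi]
    rw [if_neg (by rw [hm]; simp)]
    rw [List.nil_append]
    exact HA_irr (fa + 1) fb vals (i+1) r c cnt (by omega) hfa hfb
  | succ mh ih =>
    intro vals i r c cnt fa fb hnd h0 hi hr hm hfa hfb
    match fa, hfa with
    | fa + 1, hfa =>
    set v := PySem.List.pyGetD vals i 0 with hv
    have hvval : v = vals[i.toNat] := by
      rw [hv, PySem.List.pyGetD_eq_getElem vals 0 (by omega) (by omega)]
    have hvmem : v ∈ vals := by rw [hvval]; exact List.getElem_mem (by omega)
    have hsumge : (mh + 1 : Nat) ≤ cntSum vals cnt := by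
      have := cntSum_ge vals cnt v hvmem; omega
    by_cases hvr : v ≤ r
    case neg =>
      -- v > r > 0 : branch never taken, kmax = 0
      have hvpos : 0 < v := by omega
      have hkmax : (if 0 < v then min ((mh + 1 : Nat) : Int) (PySem.Int.floordiv r v) else ((mh + 1 : Nat):Int)) = 0 := by
        rw [if_pos hvpos, floordiv_zero_of_lt r v (by omega) (by omega)]
        have : (0:Int) ≤ (mh + 1 : Nat) := by positivity
        omega
      rw [hkmax, PySem.List.pyRange_neg_one_eq_nil (by omega), List.flatMap_nil, List.nil_append]
      rw [HA_step fa vals i r c cnt hr hi]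
      rw [if_neg (by rw [← hv]; omega)]
      rw [List.nil_append]
      exact HA_irr (fa + 1) fb vals (i+1) r c cnt (by omega) hfa hfb
    case pos =>
      have hbr : 0 < cnt.getD v 0 ∧ v ≤ r := ⟨by rw [hm]; positivity, hvr⟩
      rw [HA_step fa vals i r c cnt hr hi, if_pos hbr]
      set cnt' := cnt.insert v (cnt.getD v 0 - 1) with hcnt'
      have hcnt'v : cnt'.getD v 0 = (mh : Int) := by
        rw [hcnt', PySem.Dict.getD_insert_self, hm]; omega
      have hsumlt : cntSum vals cnt' < cntSum vals cnt :=
        cntSum_insert_lt vals cnt v hvmem (by omega)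
      have hnotin : v ∉ vals.drop (i.toNat + 1) := by
        rw [hvval]; exact nodup_getElem_not_mem_drop vals i.toNat hnd (by omega)
      have hagree : ∀ w ∈ vals.drop (i + 1).toNat, cnt'.getD w 0 = cnt.getD w 0 := by
        intro w hw
        have hw' : w ∈ vals.drop (i.toNat + 1) := by
          have : (i + 1).toNat = i.toNat + 1 := by omega
          rwa [this] at hw
        rw [hcnt', PySem.Dict.getD_insert]
        split
        · exfalso; subst w; exact hnotin hw'
        · rfl
      by_cases hrv0 : r - v = 0
      case pos =>
        -- exactly one copy fits: kmax = 1
        have hvpos : 0 < v := by omega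
        have hkmax : (if 0 < v then min ((mh + 1 : Nat) : Int) (PySem.Int.floordiv r v) else ((mh + 1 : Nat):Int)) = 1 := by
          rw [if_pos hvpos]
          have : r = v := by omega
          rw [this, floordiv_self' v hvpos]
          omega
        rw [hkmax]
        rw [PySem.List.pyRange_neg_one_cons (by omega : (0:Int) < 1)]
        have h10 : (1 - 1 : Int) = 0 := by omega
        rw [h10, PySem.List.pyRange_neg_one_eq_nil (by omega)]
        simp only [List.flatMap_cons, List.flatMap_nil, List.append_nil]
        have hone : r - 1 * v = 0 := by omega
        rw [hone]
        obtain ⟨fa', rfl⟩ : ∃ fa', fa = fa' + 1 := ⟨fa - 1, by omega⟩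
        obtain ⟨fb', rfl⟩ : ∃ fb', fb = fb' + 1 := ⟨fb - 1, by omega⟩
        have hbz : r - PySem.List.pyGetD vals i 0 = 0 := by rw [← hv]; omega
        rw [hbz, HA_zero, HA_zero]
        congr 1
        exact HA_irr (fa' + 1 + 1) (fb' + 1) vals (i+1) r c cnt (by omega) (by omega) (by omega)
      case neg =>
        have hrv : 0 < r - v := by omega
        have ihres := ih vals i (r - v) (c ++ [v]) cnt' fa fb hnd h0 hi hrv (by rw [← hv]; exact hcnt'v) (by omega) (by omega)
        rw [← hv] at ihres
        rw [ihres]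
        -- replace cnt' by cnt in the (i+1)-level calls
        have hcongr : ∀ r' c', amountHelper fb vals (i+1) r' c' cnt' = amountHelper fb vals (i+1) r' c' cnt := by
          intro r' c'
          exact HA_congr fb vals (i+1) r' c' cnt' cnt (by omega) hagree
        -- kmax bookkeeping
        set kd := PySem.Int.floordiv r v with hkd
        have hkmaxeq : (if 0 < v then min ((mh : Nat) : Int) (PySem.Int.floordiv (r - v) v) else ((mh : Nat):Int))
            = (if 0 < v then min ((mh + 1 : Nat) : Int) kd else ((mh + 1 : Nat):Int)) - 1 := by
          split
          · rw [floordiv_sub_self r v (by assumption), ← hkd]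
            have hkd1 : 1 ≤ kd := by
              have := floordiv_sub_self r v (by assumption)
              have := floordiv_nonneg' (r - v) v (by omega) (by assumption)
              omega
            omega
          · push_cast; omega
        set kmax := (if 0 < v then min ((mh + 1 : Nat) : Int) kd else ((mh + 1 : Nat):Int)) with hkmax
        have hkmax1 : 1 ≤ kmax := by
          rw [hkmax]
          split
          · have hvpos : 0 < v := by assumption
            have : PySem.Int.floordiv (r - v) v = kd - 1 := floordiv_sub_self r v hvpos
            have := floordiv_nonneg' (r - v) v (by omega) hvpos
            omega
          · push_cast; omega
        rw [hkmaxeq]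
        -- shift the countdown range
        rw [countdown_shift kmax hkmax1]
        rw [List.flatMap_append, List.flatMap_map]
        simp only [List.flatMap_cons, List.flatMap_nil, List.append_nil]
        rw [List.append_assoc, List.append_assoc]
        congr 1
        · apply List.flatMap_congr
          intro k hk
          rw [PySem.List.mem_pyRange_neg_one] at hk
          rw [hcongr]
          congr 1
          · ring_nf
          · have hk1 : (k + 1).toNat = k.toNat + 1 := by omega
            rw [hk1, List.replicate_succ]
            simp

        · congr 1
          · rw [hcongr]
            have hone : r - 1 * v = r - v := by ring
            have hrep : List.replicate ((1:Int)).toNat v = [v] := by simp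
            rw [hone, hrep]
          · exact HA_irr (fa + 1) fb vals (i+1) r c cnt (by omega) hfa hfb

lemma TG_pos (fb : Nat) (vals : List Int) (cnt0 : PySem.Dict Int Int) (i r : Int)
    (c : List Int) (hr : 0 < r) (hi : i ≠ (vals.length : Int)) :
    takeHelper (fb + 1) vals cnt0 i r c =
      (PySem.List.pyRange
          (if 0 < PySem.List.pyGetD vals i 0 then
            min (cnt0.getD (PySem.List.pyGetD vals i 0) 0)
              (PySem.Int.floordiv r (PySem.List.pyGetD vals i 0))
          else cnt0.getD (PySem.List.pyGetD vals i 0) 0) 0 (-1)).flatMap (fun k =>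
        takeHelper fb vals cnt0 (i + 1) (r - k * PySem.List.pyGetD vals i 0)
          (c ++ List.replicate k.toNat (PySem.List.pyGetD vals i 0)))
      ++ takeHelper fb vals cnt0 (i + 1) r c := by
  conv_lhs => rw [takeHelper]
  rw [if_neg (by omega), if_neg (by simp; omega)]
  show List.foldl _ [] _ ++ _ = _
  rw [PySem.List.foldl_append_eq_flatMap]
  simp

lemma TG_zero (fb : Nat) (vals : List Int) (cnt0 : PySem.Dict Int Int) (i : Int)
    (c : List Int) : takeHelper (fb + 1) vals cnt0 i 0 c = [c] := by
  rw [takeHelper]; simp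

lemma mainLemma : ∀ (μ : Nat) (vals : List Int) (cnt0 : PySem.Dict Int Int)
    (i r : Int) (c : List Int) (cnt : PySem.Dict Int Int) (fa fb : Nat),
    vals.Nodup → 0 ≤ i → i ≤ (vals.length : Int) →
    (∀ v ∈ vals.drop i.toNat, cnt.getD v 0 = cnt0.getD v 0) →
    (∀ v, 0 ≤ cnt0.getD v 0) →
    cntSum vals cnt + (vals.length - i.toNat) ≤ μ →
    cntSum vals cnt < fa → vals.length - i.toNat < fb →
    amountHelper fa vals i r c cnt = takeHelper fb vals cnt0 i r c := by
  intro μ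
  induction μ with
  | zero =>
    intro vals cnt0 i r c cnt fa fb hnd h0 hin hagree hpos hμ hfa hfb
    obtain ⟨fa', rfl⟩ : ∃ fa', fa = fa' + 1 := ⟨fa - 1, by omega⟩
    obtain ⟨fb', rfl⟩ : ∃ fb', fb = fb' + 1 := ⟨fb - 1, by omega⟩
    have hieq : i = (vals.length : Int) := by omega
    by_cases hr0 : r = 0
    · subst hr0; rw [HA_zero, TG_zero]
    by_cases hrn : r < 0
    · rw [amountHelper, takeHelper, if_neg hr0, if_neg hr0, if_pos hrn, if_pos (by left; exact hrn)]
    have hr : 0 < r := by omega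
    rw [HA_pos fa' vals i r c cnt hr]
    rw [hieq, PySem.List.pyRange_one_eq_nil (by omega), List.flatMap_nil]
    rw [takeHelper, if_neg hr0, if_pos (by right; rfl)]
  | succ μ ih =>
    intro vals cnt0 i r c cnt fa fb hnd h0 hin hagree hpos hμ hfa hfb
    obtain ⟨fa', rfl⟩ : ∃ fa', fa = fa' + 1 := ⟨fa - 1, by omega⟩
    obtain ⟨fb', rfl⟩ : ∃ fb', fb = fb' + 1 := ⟨fb - 1, by omega⟩
    by_cases hr0 : r = 0
    · subst hr0; rw [HA_zero, TG_zero]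
    by_cases hrn : r < 0
    · rw [amountHelper, takeHelper, if_neg hr0, if_neg hr0, if_pos hrn, if_pos (by left; exact hrn)]
    have hr : 0 < r := by omega
    by_cases hieq : i = (vals.length : Int)
    · rw [HA_pos fa' vals i r c cnt hr]
      rw [hieq, PySem.List.pyRange_one_eq_nil (by omega), List.flatMap_nil]
      rw [takeHelper, if_neg hr0, if_pos (by right; exact hieq ▸ rfl)]
    have hi : i < (vals.length : Int) := by omega
    set v := PySem.List.pyGetD vals i 0 with hv
    have hvval : v = vals[i.toNat] := by
      rw [hv, PySem.List.pyGetD_eq_getElem vals 0 (by omega) (by omega)]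
    have hvmem : v ∈ vals.drop i.toNat :=
      hvval ▸ getElem_mem_drop vals i.toNat i.toNat (le_refl _) (by omega)
    have hm0 : 0 ≤ cnt.getD v 0 := by rw [hagree v hvmem]; exact hpos v
    have hmhat : cnt.getD v 0 = ((cnt.getD v 0).toNat : Int) := by omega
    rw [TG_pos fb' vals cnt0 i r c hr hieq]
    rw [HA_unroll (cnt.getD v 0).toNat vals i r c cnt (fa' + 1) (fa' + 1) hnd h0 hi hr
      (by rw [← hv]; exact hmhat) hfa hfa]
    have hcnt0v : cnt0.getD (PySem.List.pyGetD vals i 0) 0 = ((cnt.getD v 0).toNat : Int) := by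
      rw [← hv, ← hagree v hvmem]; exact hmhat
    rw [hcnt0v]
    have hdropsub : ∀ w ∈ vals.drop (i + 1).toNat, cnt.getD w 0 = cnt0.getD w 0 := by
      intro w hw
      apply hagree
      have h1 : (i + 1).toNat = i.toNat + 1 := by omega
      rw [h1] at hw
      exact drop_subset_drop vals i.toNat (i.toNat + 1) (by omega) hw
    have hμ' : cntSum vals cnt + (vals.length - (i + 1).toNat) ≤ μ := by
      have : (i + 1).toNat = i.toNat + 1 := by omega
      rw [this]; omega
    have hfb' : vals.length - (i + 1).toNat < fb' := by
      have : (i + 1).toNat = i.toNat + 1 := by omega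
      rw [this]; omega
    congr 1
    · apply List.flatMap_congr
      intro k hk
      exact ih vals cnt0 (i + 1) (r - k * v) (c ++ List.replicate k.toNat v) cnt (fa' + 1) fb'
        hnd (by omega) (by omega) hdropsub hpos hμ' hfa hfb'
    · exact ih vals cnt0 (i + 1) r c cnt (fa' + 1) fb' hnd (by omega) (by omega) hdropsub hpos hμ' hfa hfb'

lemma getD_zero_fold (l : List Int) : ∀ (d : PySem.Dict Int Int) (v : Int),
    d.getD v 0 = 0 → (l.foldl (fun d num => d.insert num 0) d).getD v 0 = 0 := by
  induction l with
  | nil => intro d v h; exact h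
  | cons w t ih =>
    intro d v h
    simp only [List.foldl_cons]
    apply ih
    rw [PySem.Dict.getD_insert]
    split <;> simp [h]

lemma cntSum_le_length (A : List Int) (vals : List Int) (hperm : vals.Perm (PySem.Set.ofList A))
    (cnt : PySem.Dict Int Int) (hcnt : ∀ v ∈ vals, cnt.getD v 0 = (A.count v : Int)) :
    cntSum vals cnt ≤ A.length := by
  have h1 : cntSum vals cnt = (vals.map (fun v => A.count v)).sum := by
    unfold cntSum
    congr 1
    apply List.map_congr_left
    intro v hv
    rw [hcnt v hv]
    simp
  have hperm2 : (PySem.Set.ofList A : List Int).Perm A.dedup := by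
    rw [List.perm_ext_iff_of_nodup (PySem.Set.nodup_ofList A) (List.nodup_dedup A)]
    intro a
    rw [PySem.Set.mem_ofList, List.mem_dedup]
  have h2 : (vals.map (fun v => A.count v)).sum = (A.dedup.map (fun v => A.count v)).sum :=
    ((hperm.trans hperm2).map _).sum_eq
  rw [h1, h2, List.sum_map_count_dedup_eq_length]

-- ===== VERDICT (by name: the statement is the Claim_ definition above) =====
theorem amount_spec : Claim_equal_amount := by
  intro A S _
  unfold Spec_amount
  show amountHelper (A.length + 1) _ 0 S [] _ = takeHelper _ _ _ 0 S []
  have hcounter : A.foldl (fun d num => d.insert num (d.getD num 0 + 1)) PySem.Dict.empty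
      = PySem.Dict.counter A := PySem.Dict.foldl_insert_getD_add_one_eq_counter A
  rw [hcounter, PySem.Dict.keys_counter]
  set vals := PySem.List.sorted (PySem.Set.ofList A) (fun x => x) false with hvals
  set cnt0 : PySem.Dict Int Int := A.foldl (fun d num => d.insert num 0) PySem.Dict.empty with hcnt0
  set cntA : PySem.Dict Int Int := A.foldl (fun d num => d.modify num 0 (· + 1)) cnt0 with hcntA
  have hgetA : ∀ v, cntA.getD v 0 = (A.count v : Int) := by
    intro v
    rw [hcntA, PySem.Dict.getD_foldl_modify_add_one, getD_zero_fold A PySem.Dict.empty v rfl]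
    simp
  have hgetC : ∀ v, (PySem.Dict.counter A).getD v 0 = (A.count v : Int) := by
    intro v; exact PySem.Dict.getD_counter A v
  have hnd : vals.Nodup :=
    (PySem.List.sorted_ofList_pairwise_lt A).imp (fun h => ne_of_lt h)
  have hperm : vals.Perm (PySem.Set.ofList A) := PySem.List.sorted_perm _ _ _
  have hsum : cntSum vals cntA ≤ A.length :=
    cntSum_le_length A vals hperm cntA (fun v _ => hgetA v)
  exact mainLemma (cntSum vals cntA + vals.length) vals (PySem.Dict.counter A) 0 S [] cntA
    (A.length + 1) (vals.length + 1) hnd (le_refl 0) (by positivity)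
    (by intro v _; rw [hgetA v, hgetC v])
    (by intro v; rw [hgetC v]; positivity)
    (by simp) (by omega) (by omega)
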